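-- pv_equiv track=rewrite | github.com/boaznahum/cubesolve | archive/solver/dwalton/coords.py | corner_perm_coord
-- ===== SOURCE A (Python) =====
-- def corner_perm_coord(cp: list[int]) -> int:
--     """Corner permutation coordinate: 0..40319 (8!).
--
--     Lehmer code / factorial number system encoding.
--     """
--     val = 0
--     for i in range(7):
--         count = 0
--         for j in range(i + 1, 8):
--             if cp[j] < cp[i]:
--                 count += 1
--         val = (val + count) * (7 - i)
--     return val
-- ===== SOURCE B (Python) =====
-- FACT = (5040, 720, 120, 24, 6, 2, 1)  # (7-i)! for i = 0..6
--
--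
-- def corner_perm_coord(cp: list[int]) -> int:
--     # Pair-wise formulation grouped by the RIGHT index: each pair (i, j),
--     # i < j, with cp[j] < cp[i] contributes (7-i)! to the coordinate.
--     total = 0
--     for j in range(1, 8):
--         x = cp[j]
--         total += sum(FACT[i] for i in range(j) if x < cp[i])
--     return total
-- ===== Notes on version B (the rewrite author's own statement) =====
-- stated objective: alternative
-- what changed: Replaces the fused Horner fold over Lehmer digits (outer loop by left index i, inner count loop) with a single pair aggregation grouped by the right index j, adding a precomputed factorial weight (7-i)! per inverted pair.
import Mathlib
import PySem

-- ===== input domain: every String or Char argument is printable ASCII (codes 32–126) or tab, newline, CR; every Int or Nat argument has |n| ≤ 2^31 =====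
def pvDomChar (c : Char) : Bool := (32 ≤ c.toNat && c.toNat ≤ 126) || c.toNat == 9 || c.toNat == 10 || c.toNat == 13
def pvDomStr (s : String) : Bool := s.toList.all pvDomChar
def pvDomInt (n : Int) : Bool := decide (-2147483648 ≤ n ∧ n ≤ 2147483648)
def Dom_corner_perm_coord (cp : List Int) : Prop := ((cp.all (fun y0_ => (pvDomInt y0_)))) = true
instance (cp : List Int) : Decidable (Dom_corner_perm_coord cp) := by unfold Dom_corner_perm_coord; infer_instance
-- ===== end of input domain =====

-- B replaces A's fused Horner fold over Lehmer digits with a pair aggregation grouped by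
-- the right index, adding a precomputed factorial weight per inverted pair (alternative, same cost).

-- ===== PORT A =====
-- Lookups use pyGetD with default 0; Pre_ guarantees every accessed index is in range,
-- so the default is never consulted on admitted inputs.
def corner_perm_coord (cp : List Int) : Int :=
  (PySem.List.pyRange 0 7 1).foldl (fun val i =>
    (val +
      (PySem.List.pyRange (i + 1) 8 1).foldl (fun count j =>
        if PySem.List.pyGetD cp j 0 < PySem.List.pyGetD cp i 0 then count + 1 else count) 0)
    * (7 - i)) 0

-- ===== PORT B =====
def pvFact : List Int := [5040, 720, 120, 24, 6, 2, 1]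

def corner_perm_coord_alt (cp : List Int) : Int :=
  (PySem.List.pyRange 1 8 1).foldl (fun total j =>
    total +
      (PySem.List.pyRange 0 j 1).foldl (fun s i =>
        if PySem.List.pyGetD cp j 0 < PySem.List.pyGetD cp i 0 then s + PySem.List.pyGetD pvFact i 0 else s) 0) 0

-- ===== PRECONDITION & SPEC =====
-- Both Pythons index the first eight positions; on lists shorter than 8 they raise IndexError, so those are excluded.
def Pre_corner_perm_coord (cp : List Int) : Prop := 8 ≤ cp.length
instance (cp : List Int) : Decidable (Pre_corner_perm_coord cp) := by unfold Pre_corner_perm_coord; infer_instance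

def pvWitness_corner_perm_coord : List Int := [3, 1, 4, 1, 5, 9, 2, 6]

def Spec_corner_perm_coord (cp : List Int) (out : Int) : Prop := out = corner_perm_coord_alt cp
instance (cp : List Int) (out : Int) : Decidable (Spec_corner_perm_coord cp out) := by unfold Spec_corner_perm_coord; infer_instance

-- ===== CLAIM (what is proved, stated in full; the proofs are below) =====
def Claim_equal_corner_perm_coord : Prop := ∀ (cp : List Int), Dom_corner_perm_coord cp → Pre_corner_perm_coord cp → Spec_corner_perm_coord cp (corner_perm_coord cp)

-- ===== LEMMAS AND PROOFS =====

-- turn both fold steps into sums of 0/1-indicators so that `ring` can compare them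
theorem pv_ite_acc (p : Prop) [Decidable p] (s k : Int) :
    (if p then s + k else s) = s + k * (if p then 1 else 0) := by
  split <;> ring

theorem corner_perm_coord_spec : Claim_equal_corner_perm_coord := by
  unfold Claim_equal_corner_perm_coord
  intro cp _ hpre
  unfold Spec_corner_perm_coord
  unfold Pre_corner_perm_coord at hpre
  match cp, hpre with
  | a0 :: a1 :: a2 :: a3 :: a4 :: a5 :: a6 :: a7 :: rest, _ =>
    simp only [corner_perm_coord, corner_perm_coord_alt, pvFact,
      show PySem.List.pyRange 0 7 1 = [0, 1, 2, 3, 4, 5, 6] from by decide,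
      show PySem.List.pyRange 1 8 1 = [1, 2, 3, 4, 5, 6, 7] from by decide,
      show PySem.List.pyRange (0 + 1) 8 1 = [1, 2, 3, 4, 5, 6, 7] from by decide,
      show PySem.List.pyRange (1 + 1) 8 1 = [2, 3, 4, 5, 6, 7] from by decide,
      show PySem.List.pyRange (2 + 1) 8 1 = [3, 4, 5, 6, 7] from by decide,
      show PySem.List.pyRange (3 + 1) 8 1 = [4, 5, 6, 7] from by decide,
      show PySem.List.pyRange (4 + 1) 8 1 = [5, 6, 7] from by decide,
      show PySem.List.pyRange (5 + 1) 8 1 = [6, 7] from by decide,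
      show PySem.List.pyRange (6 + 1) 8 1 = [7] from by decide,
      show PySem.List.pyRange 0 1 1 = [0] from by decide,
      show PySem.List.pyRange 0 2 1 = [0, 1] from by decide,
      show PySem.List.pyRange 0 3 1 = [0, 1, 2] from by decide,
      show PySem.List.pyRange 0 4 1 = [0, 1, 2, 3] from by decide,
      show PySem.List.pyRange 0 5 1 = [0, 1, 2, 3, 4] from by decide,
      show PySem.List.pyRange 0 6 1 = [0, 1, 2, 3, 4, 5] from by decide,
      List.foldl_cons, List.foldl_nil]
    simp only [PySem.List.pyGetD_ofNat', List.getD, List.getElem?_cons_zero, List.getElem?_cons_succ, Option.getD_some,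
      pv_ite_acc]
    ring
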